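-- pv_equiv track=rewrite | github.com/joaovmour4/memory-manager-paginacao | dicionario.py | verifyMemory
-- ===== SOURCE A (Python) =====
-- def verifyMemory(memory, size):
--     aux = 0
--     for elemento in memory.keys():
--         if memory[elemento] != '-':
--             aux = 0
--         else:
--             aux += 1
--             if aux == size:
--                 return elemento - (size-1)
-- ===== SOURCE B (Python) =====
-- def verifyMemory(memory, size):
--     # Span decomposition: carve the item list into maximal runs of equal
--     # slot value; answer from the first '-' run of length >= size.
--     if size < 1:
--         return None
--     items = list(memory.items())
--     n = len(items)
--     start = 0
--     while start < n:
--         end = start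
--         while end < n and items[end][1] == items[start][1]:
--             end += 1
--         if items[start][1] == '-' and end - start >= size:
--             return items[start + size - 1][0] - (size - 1)
--         start = end
-- ===== Notes on version B (the rewrite author's own statement) =====
-- stated objective: alternative
-- what changed: Replaces the incremental free-slot counter with per-element early exit by a span decomposition: repeatedly carve off the maximal run of equal-valued slots and index the size-th key of the first '-' run of length >= size.
import Mathlib
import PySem

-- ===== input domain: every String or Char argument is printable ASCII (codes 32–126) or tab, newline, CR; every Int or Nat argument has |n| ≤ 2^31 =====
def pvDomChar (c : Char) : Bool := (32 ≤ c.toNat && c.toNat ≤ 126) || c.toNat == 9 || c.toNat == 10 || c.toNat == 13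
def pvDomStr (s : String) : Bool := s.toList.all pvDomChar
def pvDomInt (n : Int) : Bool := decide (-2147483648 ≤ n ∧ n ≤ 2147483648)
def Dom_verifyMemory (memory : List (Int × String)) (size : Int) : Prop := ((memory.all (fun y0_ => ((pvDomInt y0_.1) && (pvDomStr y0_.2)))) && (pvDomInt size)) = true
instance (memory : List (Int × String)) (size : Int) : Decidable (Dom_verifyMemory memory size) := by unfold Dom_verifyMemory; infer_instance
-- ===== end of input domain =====

-- B replaces A's incremental counter/early-exit scan by a span decomposition
-- (maximal equal-value runs, then index into the first long-enough '-' run);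
-- same asymptotic cost, alternative algorithm.


-- ===== PORT A =====
-- A iterates the dict's keys with `memory[elemento]`; since dict keys are
-- unique, that is exactly a walk over the dict's items (key, value) in order,
-- carrying the counter `aux` and returning early when it reaches `size`.
def vmLoopA (size : Int) : List (Int × String) → Int → Option Int
  | [], _ => none
  | (k, v) :: rest, aux =>
    if v ≠ "-" then vmLoopA size rest 0
    else if aux + 1 = size then some (k - (size - 1))
    else vmLoopA size rest (aux + 1)

def verifyMemory (memory : List (Int × String)) (size : Int) : Option Int :=
  vmLoopA size (PySem.Dict.ofList memory).items 0

-- ===== PORT B =====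
-- Source B's outer while loop: each step carves off the maximal run of items with
-- the current head's value (inner while = takeWhile / dropWhile) and either
-- answers from that run (items[start+size-1] = run[size-1]) or moves past it.
def vmLoopB (size : Int) : List (Int × String) → Option Int
  | [] => none
  | (k, v) :: rest =>
    let run := (k, v) :: rest.takeWhile (fun p => p.2 == v)
    if v == "-" && decide (size ≤ (run.length : Int)) then
      match PySem.List.pyGet? run (size - 1) with
      | some p => some (p.1 - (size - 1))
      | none => none
    else vmLoopB size (rest.dropWhile (fun p => p.2 == v))
termination_by l => l.length
decreasing_by
  simp only [List.length_cons]
  exact Nat.lt_succ_of_le (List.length_dropWhile_le _ _)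

def verifyMemory_alt (memory : List (Int × String)) (size : Int) : Option Int :=
  if size < 1 then none
  else vmLoopB size (PySem.Dict.ofList memory).items

-- ===== PRECONDITION & SPEC =====
def Spec_verifyMemory (memory : List (Int × String)) (size : Int) (out : Option Int) : Prop := out = verifyMemory_alt memory size
instance (memory : List (Int × String)) (size : Int) (out : Option Int) : Decidable (Spec_verifyMemory memory size out) := by unfold Spec_verifyMemory; infer_instance

-- ===== CLAIM (what is proved, stated in full; the proofs are below) =====
def Claim_equal_verifyMemory : Prop := ∀ (memory : List (Int × String)) (size : Int), Dom_verifyMemory memory size → Spec_verifyMemory memory size (verifyMemory memory size)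

-- ===== LEMMAS AND PROOFS =====

-- size ≤ 0: aux only grows from a nonnegative start, so aux+1 = size never fires.
theorem vmLoopA_none_of_nonpos (size : Int) (hs : size ≤ 0) :
    ∀ (l : List (Int × String)) (aux : Int), 0 ≤ aux → vmLoopA size l aux = none := by
  intro l
  induction l with
  | nil => intro aux _; rfl
  | cons x t ih =>
    intro aux ha
    obtain ⟨k, v⟩ := x
    simp only [vmLoopA]
    split
    · exact ih 0 le_rfl
    · rw [if_neg (by omega)]
      exact ih (aux + 1) (by omega)

-- a block of non-'-' slots is skipped, leaving the counter at 0
theorem vmLoopA_skip (size : Int) :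
    ∀ (p t : List (Int × String)), (∀ x ∈ p, x.2 ≠ "-") →
      vmLoopA size (p ++ t) 0 = vmLoopA size t 0 := by
  intro p
  induction p with
  | nil => intro t _; rfl
  | cons x p' ih =>
    intro t h
    obtain ⟨k, v⟩ := x
    have hv : v ≠ "-" := h (k, v) (by simp)
    simp only [List.cons_append, vmLoopA, if_pos hv]
    exact ih t (fun y hy => h y (by simp [hy]))

-- a '-' run too short to reach `size` just adds its length to the counter
theorem vmLoopA_pass (size : Int) :
    ∀ (run t : List (Int × String)) (aux : Int), (∀ x ∈ run, x.2 = "-") → 0 ≤ aux →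
      aux + run.length < size →
      vmLoopA size (run ++ t) aux = vmLoopA size t (aux + run.length) := by
  intro run
  induction run with
  | nil => intro t aux _ _ _; simp
  | cons x r ih =>
    intro t aux h ha hl
    obtain ⟨k, v⟩ := x
    have hv : v = "-" := h (k, v) (by simp)
    subst hv
    simp only [List.length_cons] at hl
    simp only [List.cons_append, vmLoopA]
    rw [if_neg (by simp), if_neg (by push_cast at hl ⊢; omega)]
    rw [ih t (aux + 1) (fun y hy => h y (by simp [hy])) (by omega)
        (by push_cast at hl ⊢; omega)]
    congr 1
    simp only [List.length_cons]
    push_cast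
    ring

-- a '-' run long enough to reach `size` makes A answer from its (size-aux)-th key
theorem vmLoopA_hit (size : Int) :
    ∀ (run t : List (Int × String)) (aux : Int), (∀ x ∈ run, x.2 = "-") → 0 ≤ aux →
      aux < size → size ≤ aux + run.length →
      vmLoopA size (run ++ t) aux =
        (PySem.List.pyGet? run (size - 1 - aux)).map (fun p => p.1 - (size - 1)) := by
  intro run
  induction run with
  | nil => intro t aux _ _ h1 h2; simp at h2; omega
  | cons x r ih =>
    intro t aux h ha h1 h2
    obtain ⟨k, v⟩ := x
    have hv : v = "-" := h (k, v) (by simp)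
    subst hv
    simp only [List.length_cons] at h2
    simp only [List.cons_append, vmLoopA]
    rw [if_neg (by simp)]
    by_cases he : aux + 1 = size
    · rw [if_pos he]
      have h0 : size - 1 - aux = 0 := by omega
      rw [h0, PySem.List.pyGet?_zero_cons]
      rfl
    · rw [if_neg he]
      rw [ih t (aux + 1) (fun y hy => h y (by simp [hy])) (by omega) (by omega)
          (by push_cast at h2 ⊢; omega)]
      rw [PySem.List.pyGet?_of_nonneg r (by omega : (0:Int) ≤ size - 1 - (aux + 1)),
          PySem.List.pyGet?_of_nonneg ((k, "-") :: r) (by omega : (0:Int) ≤ size - 1 - aux)]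
      have hidx : (size - 1 - aux).toNat = (size - 1 - (aux + 1)).toNat + 1 := by omega
      rw [hidx, List.getElem?_cons_succ]

-- the first element dropWhile keeps falsifies the predicate
theorem dropWhile_head_false {α : Type} (p : α → Bool) :
    ∀ (l : List α) (x : α) (t : List α), l.dropWhile p = x :: t → p x = false := by
  intro l
  induction l with
  | nil => intro x t h; simp at h
  | cons y l' ih =>
    intro x t h
    by_cases hy : p y
    · rw [List.dropWhile_cons_of_pos hy] at h
      exact ih x t h
    · rw [List.dropWhile_cons_of_neg hy] at h
      cases h
      exact eq_false_of_ne_true hy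

theorem vmLoop_eq (size : Int) (hs : 1 ≤ size) :
    ∀ (n : Nat) (l : List (Int × String)), l.length ≤ n →
      vmLoopA size l 0 = vmLoopB size l := by
  intro n
  induction n with
  | zero =>
    intro l hl
    have : l = [] := by cases l <;> simp_all
    subst this
    simp [vmLoopA, vmLoopB]
  | succ n ih =>
    intro l hl
    match l with
    | [] => simp [vmLoopA, vmLoopB]
    | (k, v) :: rest =>
      simp only [List.length_cons] at hl
      by_cases hv : v = "-"
      · subst hv
        set run : List (Int × String) :=
          (k, "-") :: rest.takeWhile (fun p => p.2 == "-") with hrun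
        have hall : ∀ x ∈ run, x.2 = "-" := by
          intro x hx
          rw [hrun] at hx
          rcases List.mem_cons.mp hx with hx | hx
          · rw [hx]
          · have := List.mem_takeWhile_imp hx
            exact eq_of_beq this
        have hsplit : (k, "-") :: rest =
            run ++ rest.dropWhile (fun p => p.2 == "-") := by
          rw [hrun]
          simp [List.takeWhile_append_dropWhile]
        by_cases hle : size ≤ (run.length : Int)
        · -- the first '-' run is long enough: both answer run[size-1]
          conv_lhs => rw [hsplit]
          rw [vmLoopA_hit size run _ 0 hall le_rfl (by omega) (by omega)]
          have hlt : (size - 1).toNat < run.length := by omega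
          show _ = vmLoopB size ((k, "-") :: rest)
          rw [vmLoopB]
          rw [if_pos (by simp [← hrun, hle])]
          rw [← hrun]
          have : size - 1 - 0 = size - 1 := by ring
          rw [this, PySem.List.pyGet?_of_nonneg run (by omega : (0:Int) ≤ size - 1),
              List.getElem?_eq_getElem hlt]
          rfl
        · -- the run is too short: A counts through it, B jumps past it
          have hpass := vmLoopA_pass size run (rest.dropWhile (fun p => p.2 == "-")) 0
            hall le_rfl (by omega)
          conv_lhs => rw [hsplit]
          rw [hpass]
          have hdrop0 : vmLoopA size (rest.dropWhile (fun p => p.2 == "-"))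
              (0 + (run.length : Int)) =
              vmLoopA size (rest.dropWhile (fun p => p.2 == "-")) 0 := by
            cases hd : rest.dropWhile (fun p => p.2 == "-") with
            | nil => rfl
            | cons y t' =>
              obtain ⟨k', v'⟩ := y
              have hv' : v' ≠ "-" := by
                have := dropWhile_head_false _ rest _ _ hd
                simpa using this
              simp only [vmLoopA, if_pos hv']
          rw [hdrop0]
          have hlen : (rest.dropWhile (fun p => p.2 == "-")).length ≤ n :=
            le_trans (List.length_dropWhile_le _ _) (by omega)
          rw [ih _ hlen]
          show _ = vmLoopB size ((k, "-") :: rest)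
          rw [vmLoopB]
          rw [if_neg (by simp [← hrun]; omega)]
      · -- head value is not '-': skip the whole equal-value run on both sides
        have hsplit : (k, v) :: rest =
            ((k, v) :: rest.takeWhile (fun p => p.2 == v)) ++
              rest.dropWhile (fun p => p.2 == v) := by
          simp [List.takeWhile_append_dropWhile]
        have hne : ∀ x ∈ (k, v) :: rest.takeWhile (fun p => p.2 == v), x.2 ≠ "-" := by
          intro x hx
          rcases List.mem_cons.mp hx with hx | hx
          · rw [hx]; exact hv
          · have := List.mem_takeWhile_imp hx
            have : x.2 = v := eq_of_beq this
            rw [this]; exact hv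
        conv_lhs => rw [hsplit]
        rw [vmLoopA_skip size _ _ hne]
        have hlen : (rest.dropWhile (fun p => p.2 == v)).length ≤ n :=
          le_trans (List.length_dropWhile_le _ _) (by omega)
        rw [ih _ hlen]
        show _ = vmLoopB size ((k, v) :: rest)
        rw [vmLoopB]
        rw [if_neg (by simp [hv])]

-- ===== VERDICT (by name: the statement is the Claim_ definition above) =====
theorem verifyMemory_spec : Claim_equal_verifyMemory := by
  unfold Claim_equal_verifyMemory Spec_verifyMemory
  intro memory size _
  by_cases hs : size < 1
  · unfold verifyMemory verifyMemory_alt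
    rw [if_pos hs, vmLoopA_none_of_nonpos size (by omega) _ 0 le_rfl]
  · unfold verifyMemory verifyMemory_alt
    rw [if_neg hs, vmLoop_eq size (by omega) _ _ le_rfl]
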